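-- pv_equiv track=rewrite | github.com/rlarjsdn2313/algorithm_problems | first/숫자 카드/solution.py | solution
-- ===== SOURCE A (Python) =====
-- def solution(case):
--     result = [0 for _ in range(len(case))]
--     SortedCase = case
--     for i in range(len(SortedCase)):
--         if SortedCase[i] == 6:
--             SortedCase[i] = 9
--     SortedCase = list(reversed(SortedCase))
--     SortedCase.sort(reverse=True)
--
--     end = len(SortedCase) - 1
--     start = 0
--
--     for i in range(len(SortedCase)):
--         if (i + 1) % 2 == 0:
--             result[end] = SortedCase[i]
--             end -= 1
--         else:
--             result[start] = SortedCase[i]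
--             start += 1
--
--     return result
-- ===== SOURCE B (Python) =====
-- def solution(case):
--     case[:] = [9 if x == 6 else x for x in case]
--     s = sorted(case, reverse=True)
--     return s[0::2] + s[1::2][::-1]
-- ===== Notes on version B (the rewrite author's own statement) =====
-- stated objective: simpler
-- what changed: Replaces A's preallocated result array, index arithmetic and two-pointer alternating fill loop (plus the redundant reversed() before sorting) with two strided slices of the descending sort: the even-indexed elements form the front and the reversed odd-indexed elements form the back, returned as s[0::2] + s[1::2][::-1].
import Mathlib
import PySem

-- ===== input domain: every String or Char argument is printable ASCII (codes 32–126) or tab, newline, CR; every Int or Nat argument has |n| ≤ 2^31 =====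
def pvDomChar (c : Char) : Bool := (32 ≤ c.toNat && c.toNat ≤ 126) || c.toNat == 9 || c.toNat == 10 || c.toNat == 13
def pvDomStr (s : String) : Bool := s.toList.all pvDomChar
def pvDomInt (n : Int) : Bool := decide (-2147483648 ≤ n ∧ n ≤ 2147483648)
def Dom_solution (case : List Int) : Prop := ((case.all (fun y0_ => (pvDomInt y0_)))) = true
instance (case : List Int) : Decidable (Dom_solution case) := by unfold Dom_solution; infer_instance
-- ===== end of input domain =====

-- B replaces A's preallocated result array and two-pointer alternating fill with two
-- strided slices of the descending sort: s[0::2] ++ reverse s[1::2]; objective: simpler.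
-- Both A and B mutate `case` in place (6 -> 9) identically; the theorems are about the
-- return value.

-- ===== PORT A =====
def solution (case : List Int) : List Int :=
  let result := List.replicate case.length (0 : Int)
  let sc1 := (PySem.List.pyRange 0 case.length 1).foldl
      (fun s i => if PySem.List.pyGetD s i 0 = 6 then PySem.List.pySetD s i 9 else s) case
  let sc2 := sc1.reverse
  let sc := PySem.List.sorted sc2 (fun x => x) true
  let fin := (PySem.List.pyRange 0 sc.length 1).foldl
      (fun (st : List Int × Int × Int) i =>
        if PySem.Int.mod (i + 1) 2 = 0 then
          (PySem.List.pySetD st.1 st.2.2 (PySem.List.pyGetD sc i 0), st.2.1, st.2.2 - 1)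
        else
          (PySem.List.pySetD st.1 st.2.1 (PySem.List.pyGetD sc i 0), st.2.1 + 1, st.2.2))
      (result, 0, (sc.length : Int) - 1)
  fin.1

-- ===== PORT B =====
def solution_alt (case : List Int) : List Int :=
  let s := PySem.List.sorted (case.map (fun x => if x = 6 then 9 else x)) (fun x => x) true
  ((PySem.List.slice? s (some 0) none 2).getD []) ++
  ((PySem.List.slice? ((PySem.List.slice? s (some 1) none 2).getD []) none none (-1)).getD [])

-- ===== PRECONDITION & SPEC =====
def Spec_solution (case : List Int) (out : List Int) : Prop := out = solution_alt case
instance (case : List Int) (out : List Int) : Decidable (Spec_solution case out) := by unfold Spec_solution; infer_instance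

-- ===== CLAIM (what is proved, stated in full; the proofs are below) =====
def Claim_equal_solution : Prop := ∀ (case : List Int), Dom_solution case → Spec_solution case (solution case)

-- ===== LEMMAS AND PROOFS =====
def weaveB : List Int → List Int
  | [] => []
  | [a] => [a]
  | a :: b :: rest => [a] ++ weaveB rest ++ [b]

def pvEvens : List Int → List Int
  | [] => []
  | [a] => [a]
  | a :: _ :: t => a :: pvEvens t

def pvOdds : List Int → List Int
  | [] => []
  | [_] => []
  | _ :: b :: t => b :: pvOdds t

def pvF (x : Int) : Int := if x = 6 then 9 else x

theorem pv_set_mid {α : Type} (p t : List α) (x v : α) :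
    (p ++ x :: t).set p.length v = p ++ v :: t := by
  induction p with
  | nil => simp
  | cons a p ih => simp [ih]

theorem pv_get_mid {α : Type} (p t : List α) (x : α) (d : α) :
    (p ++ x :: t).getD p.length d = x := by
  induction p with
  | nil => simp
  | cons a p ih => simpa using ih

theorem pv_mut_loop (t p : List Int) :
    (PySem.List.pyRange (p.length : Int) ((p.length : Int) + (t.length : Int)) 1).foldl
      (fun s i => if PySem.List.pyGetD s i 0 = 6 then PySem.List.pySetD s i 9 else s) (p ++ t)
    = p ++ t.map pvF := by
  induction t generalizing p with
  | nil => simp [PySem.List.pyRange_one_eq_nil]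
  | cons x t' ih =>
    rw [PySem.List.pyRange_one_cons (by push_cast [List.length_cons]; omega)]
    simp only [List.foldl_cons]
    have hget : PySem.List.pyGetD (p ++ x :: t') (p.length : Int) 0 = x := by
      rw [PySem.List.pyGetD_natCast]; exact pv_get_mid p t' x 0
    have hset : PySem.List.pySetD (p ++ x :: t') (p.length : Int) (9:Int) = p ++ 9 :: t' := by
      rw [PySem.List.pySetD_natCast]; exact pv_set_mid p t' x 9
    have hstate : (if PySem.List.pyGetD (p ++ x :: t') (p.length : Int) 0 = 6
        then PySem.List.pySetD (p ++ x :: t') (p.length : Int) 9 else p ++ x :: t')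
        = (p ++ [pvF x]) ++ t' := by
      rw [hget, hset]; unfold pvF; split_ifs <;> simp
    rw [hstate]
    have h2 := ih (p ++ [pvF x])
    have e1 : ((p ++ [pvF x]).length : Int) = (p.length : Int) + 1 := by simp
    have e2 : ((p.length : Int) + 1) + (t'.length : Int) = (p.length : Int) + ((x :: t').length : Int) := by
      simp; ring
    rw [e1, e2] at h2
    rw [h2]
    simp [pvF]

def pvStep (st : List Int × Int × Int) (p : Int × Int) : List Int × Int × Int :=
  if PySem.Int.mod (p.1 + 1) 2 = 0 then
    (PySem.List.pySetD st.1 st.2.2 p.2, st.2.1, st.2.2 - 1)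
  else
    (PySem.List.pySetD st.1 st.2.1 p.2, st.2.1 + 1, st.2.2)

theorem pv_fill_loop (S : List Int) : ∀ (A M B : List Int) (i0 : Int),
    M.length = S.length → 0 ≤ i0 → i0 % 2 = 0 →
    ((PySem.List.enumerate S i0).foldl pvStep
      (A ++ M ++ B, (A.length : Int), (A.length : Int) + (M.length : Int) - 1)).1
    = A ++ weaveB S ++ B := by
  induction S using weaveB.induct with
  | case1 =>
    intro A M B i0 hm _ _
    have : M = [] := List.eq_nil_of_length_eq_zero hm
    subst this; simp [weaveB]
  | case2 a =>
    intro A M B i0 hm h0 he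
    obtain ⟨m, rfl⟩ : ∃ m, M = [m] := by
      cases M with
      | nil => simp at hm
      | cons m M' => cases M' with
        | nil => exact ⟨m, rfl⟩
        | cons _ _ => simp at hm
    simp only [PySem.List.enumerate_cons, PySem.List.enumerate_nil, List.foldl_cons, List.foldl_nil]
    have hc : PySem.Int.mod (i0 + 1) 2 = 1 := by
      rw [PySem.Int.mod_eq_emod_of_pos (by norm_num)]; omega
    simp only [pvStep, hc]
    norm_num
    simp [weaveB]
  | case3 a b rest ih =>
    intro A M B i0 hm h0 he
    obtain ⟨m1, M', rfl⟩ : ∃ m1 M', M = m1 :: M' := by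
      cases M with
      | nil => simp at hm
      | cons m1 M' => exact ⟨m1, M', rfl⟩
    have hM' : M' ≠ [] := by
      intro h; subst h; simp at hm
    obtain ⟨M'', z, rfl⟩ : ∃ M'' z, M' = M'' ++ [z] := by
      obtain ⟨l', c, h⟩ := (List.eq_nil_or_concat M').resolve_left hM'
      exact ⟨l', c, by simpa using h⟩
    simp only [PySem.List.enumerate_cons, List.foldl_cons]
    have hc1 : PySem.Int.mod (i0 + 1) 2 = 1 := by
      rw [PySem.Int.mod_eq_emod_of_pos (by norm_num)]; omega
    have hc2 : PySem.Int.mod (i0 + 1 + 1) 2 = 0 := by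
      rw [PySem.Int.mod_eq_emod_of_pos (by norm_num)]; omega
    simp only [pvStep, hc1, hc2]
    norm_num
    -- second write (back)
    have e2 : (A ++ a :: (M'' ++ z :: B)) = (A ++ a :: M'') ++ z :: B := by simp
    have e3 : ((A.length : Int) + ((M''.length : Int) + 1 + 1) - 1)
        = (((A ++ a :: M'').length : Nat) : Int) := by
      simp; omega
    rw [e2, e3, PySem.List.pySetD_natCast, pv_set_mid]
    -- apply IH
    have hm2 : M''.length = rest.length := by simp at hm; omega
    have h4 := ih (A ++ [a]) M'' (b :: B) (i0 + 1 + 1) (by simpa using hm2) (by omega) (by omega)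
    have e5 : (A ++ a :: M'') ++ b :: B = (A ++ [a]) ++ M'' ++ (b :: B) := by simp
    have e6 : (((A ++ a :: M'').length : Nat) : Int) - 1
        = (((A ++ [a]).length : Nat) : Int) + ((M''.length : Nat) : Int) - 1 := by
      simp; omega
    have e8 : ((A.length : Int) + 1) = (((A ++ [a]).length : Nat) : Int) := by simp
    rw [e5, e6, e8, h4]
    simp [weaveB]

theorem pv_sorted_rev_congr (xs ys : List Int) (h : xs.Perm ys) :
    PySem.List.sorted xs (fun x => x) true = PySem.List.sorted ys (fun x => x) true := by
  exact (((PySem.List.sorted_perm xs _ _).trans h).trans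
      (PySem.List.sorted_perm ys _ _).symm).eq_of_pairwise
    (fun a b _ _ h1 h2 => le_antisymm h2 h1)
    (PySem.List.sorted_pairwise_rev xs (fun x => x))
    (PySem.List.sorted_pairwise_rev ys (fun x => x))

theorem pv_main (case : List Int) :
    solution case = weaveB (PySem.List.sorted (case.map pvF) (fun x => x) true) := by
  unfold solution
  have hmut : (PySem.List.pyRange 0 (case.length : Int) 1).foldl
      (fun s i => if PySem.List.pyGetD s i 0 = 6 then PySem.List.pySetD s i 9 else s) case
      = case.map pvF := by
    have := pv_mut_loop case []
    simpa using this
  rw [hmut]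
  dsimp only
  have hsort : PySem.List.sorted (case.map pvF).reverse (fun x => x) true
      = PySem.List.sorted (case.map pvF) (fun x => x) true := by
    exact pv_sorted_rev_congr _ _ (List.reverse_perm _)
  rw [hsort]
  set S := PySem.List.sorted (case.map pvF) (fun x => x) true with hS
  have hlen : S.length = case.length := by
    rw [hS, PySem.List.length_sorted]; simp
  have hconv : (PySem.List.pyRange 0 (S.length : Int) 1).foldl
      (fun (st : List Int × Int × Int) i =>
        if PySem.Int.mod (i + 1) 2 = 0 then
          (PySem.List.pySetD st.1 st.2.2 (PySem.List.pyGetD S i 0), st.2.1, st.2.2 - 1)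
        else
          (PySem.List.pySetD st.1 st.2.1 (PySem.List.pyGetD S i 0), st.2.1 + 1, st.2.2))
      (List.replicate case.length 0, 0, (S.length : Int) - 1)
      = (PySem.List.enumerate S 0).foldl pvStep
      (List.replicate case.length 0, 0, (S.length : Int) - 1) := by
    rw [PySem.List.enumerate_eq_map_pyRange (d := 0), List.foldl_map]
    simp [pvStep]
  rw [hconv]
  have h5 := pv_fill_loop S [] (List.replicate case.length 0) [] 0
      (by simp [hlen]) (by norm_num) (by norm_num)
  simpa [hlen] using h5

theorem pv_fm_evens (xs : List Int) :
    List.filterMap (fun k : Nat => xs[(2 * (k:Int)).toNat]?) (List.range ((xs.length + 1) / 2))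
      = pvEvens xs := by
  induction xs using pvEvens.induct with
  | case1 => simp [pvEvens]
  | case2 a => simp [pvEvens]
  | case3 a b t ih =>
    have hc : ((a :: b :: t).length + 1) / 2 = (t.length + 1) / 2 + 1 := by
      simp [List.length_cons]; omega
    rw [hc, List.range_succ_eq_map, List.filterMap_cons, List.filterMap_map]
    have h0 : (a :: b :: t)[(2 * ((0:Nat):Int)).toNat]? = some a := by norm_num
    rw [h0]
    have hstep : ∀ k : Nat, ((fun k : Nat => (a :: b :: t)[(2 * (k:Int)).toNat]?) ∘ Nat.succ) k
        = (fun k : Nat => t[(2 * (k:Int)).toNat]?) k := by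
      intro k
      simp only [Function.comp]
      have e1 : (2 * ((Nat.succ k : Nat) : Int)).toNat = (2 * (k:Int)).toNat + 1 + 1 := by
        push_cast; omega
      rw [e1]
      simp [List.getElem?_cons_succ]
    rw [funext hstep, ih]
    simp [pvEvens]

theorem pv_fm_odds (xs : List Int) :
    List.filterMap (fun k : Nat => xs[(1 + 2 * (k:Int)).toNat]?) (List.range (xs.length / 2))
      = pvOdds xs := by
  induction xs using pvOdds.induct with
  | case1 => simp [pvOdds]
  | case2 a => simp [pvOdds]
  | case3 a b t ih =>
    have hc : (a :: b :: t).length / 2 = t.length / 2 + 1 := by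
      simp [List.length_cons]; omega
    rw [hc, List.range_succ_eq_map, List.filterMap_cons, List.filterMap_map]
    have h0 : (a :: b :: t)[(1 + 2 * ((0:Nat):Int)).toNat]? = some b := by norm_num
    rw [h0]
    have hstep : ∀ k : Nat, ((fun k : Nat => (a :: b :: t)[(1 + 2 * (k:Int)).toNat]?) ∘ Nat.succ) k
        = (fun k : Nat => t[(1 + 2 * (k:Int)).toNat]?) k := by
      intro k
      simp only [Function.comp]
      have e1 : (1 + 2 * ((Nat.succ k : Nat) : Int)).toNat = (1 + 2 * (k:Int)).toNat + 1 + 1 := by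
        push_cast; omega
      rw [e1]
      simp [List.getElem?_cons_succ]
    rw [funext hstep, ih]
    simp [pvOdds]

theorem pv_slice_evens (xs : List Int) :
    PySem.List.slice? xs (some 0) none 2 = some (pvEvens xs) := by
  simp only [PySem.List.slice?, PySem.List.sliceIndices]
  norm_num
  have hc : (if 0 < xs.length then (((xs.length : Int) + 2 - 1) / 2).toNat else 0)
      = (xs.length + 1) / 2 := by split <;> omega
  rw [hc]
  exact pv_fm_evens xs

theorem pv_slice_odds (xs : List Int) :
    PySem.List.slice? xs (some 1) none 2 = some (pvOdds xs) := by
  simp only [PySem.List.slice?, PySem.List.sliceIndices]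
  norm_num
  cases xs with
  | nil => simp [pvOdds]
  | cons a t =>
    have hmin : min (1:Int) (((a :: t).length : Int)) = 1 := by
      simp [List.length_cons]
    simp only [hmin]
    have hc : (if 1 < (a :: t).length then ((((a :: t).length : Int) - 1 + 2 - 1) / 2).toNat else 0)
        = (a :: t).length / 2 := by
      simp only [List.length_cons]
      split <;> omega
    rw [hc]
    exact pv_fm_odds (a :: t)


theorem pv_weave_split (S : List Int) : weaveB S = pvEvens S ++ (pvOdds S).reverse := by
  induction S using weaveB.induct with
  | case1 => simp [weaveB, pvEvens, pvOdds]
  | case2 a => simp [weaveB, pvEvens, pvOdds]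
  | case3 a b rest ih => simp [weaveB, pvEvens, pvOdds, ih]

-- ===== VERDICT (by name: the statement is the Claim_ definition above) =====
theorem solution_spec : Claim_equal_solution := by
  intro case _
  unfold Spec_solution solution_alt
  rw [pv_main case]
  dsimp only
  rw [pv_slice_evens, pv_slice_odds, PySem.List.slice?_none_none_neg_one]
  simp only [Option.getD_some]
  exact pv_weave_split _
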